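-- pv_equiv track=rewrite | github.com/BrinaKlobcaver/Vislice | test.py | je_deljivo_s_katerim_od
-- ===== SOURCE A (Python) =====
-- def je_deljivo_s_katerim_od(n, seznam):
--     if seznam == []:
--         return False
--     if n % seznam[0] == 0:
--         return True
--     if not(n % seznam[0] == 0):
--         return je_deljivo_s_katerim_od(n, seznam[1:])
--     else:
--         return False
-- ===== SOURCE B (Python) =====
-- def je_deljivo_s_katerim_od(n, seznam):
--     return any(n % x == 0 for x in seznam)
-- ===== Notes on version B (the rewrite author's own statement) =====
-- stated objective: faster
-- what changed: Replaces the recursion that copies the tail via seznam[1:] on every step by a single short-circuiting any() scan over the list.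
import Mathlib
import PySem

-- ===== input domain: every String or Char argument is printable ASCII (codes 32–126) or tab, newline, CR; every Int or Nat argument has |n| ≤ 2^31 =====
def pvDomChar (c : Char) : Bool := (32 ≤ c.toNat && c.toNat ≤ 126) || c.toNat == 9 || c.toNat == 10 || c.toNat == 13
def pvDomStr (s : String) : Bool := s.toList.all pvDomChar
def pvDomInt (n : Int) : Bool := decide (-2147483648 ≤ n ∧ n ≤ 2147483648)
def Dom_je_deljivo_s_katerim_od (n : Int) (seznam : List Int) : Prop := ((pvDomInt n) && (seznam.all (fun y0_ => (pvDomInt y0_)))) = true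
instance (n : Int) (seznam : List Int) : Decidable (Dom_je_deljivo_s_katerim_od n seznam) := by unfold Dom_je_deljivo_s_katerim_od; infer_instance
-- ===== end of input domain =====

-- B replaces A's recursion-with-slicing by a single short-circuiting any() scan (idiomatic).

-- ===== PORT A =====
-- literal transliteration: empty check, head test, recurse on the tail (seznam[1:])
def je_deljivo_s_katerim_od (n : Int) (seznam : List Int) : Bool :=
  match seznam with
  | [] => false
  | x :: rest =>
    if PySem.Int.mod n x = 0 then true
    else if ¬ (PySem.Int.mod n x = 0) then je_deljivo_s_katerim_od n rest
    else false

-- ===== PORT B =====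
def je_deljivo_s_katerim_od_alt (n : Int) (seznam : List Int) : Bool :=
  seznam.any (fun x => PySem.Int.mod n x == 0)

-- ===== PRECONDITION & SPEC =====
-- Pre_ excludes exactly the inputs on which Python A raises ZeroDivisionError:
-- those whose first divisor of n (if any) is preceded by a 0 element.
def Pre_je_deljivo_s_katerim_od (n : Int) (seznam : List Int) : Prop :=
  ∀ i : Nat, i < seznam.length → seznam.getD i 1 = 0 →
    ∃ j : Nat, j < i ∧ PySem.Int.mod n (seznam.getD j 1) = 0
instance (n : Int) (seznam : List Int) : Decidable (Pre_je_deljivo_s_katerim_od n seznam) := by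
  unfold Pre_je_deljivo_s_katerim_od; infer_instance
def pvWitness_je_deljivo_s_katerim_od : Int × List Int := (6, [4, 3])
def Spec_je_deljivo_s_katerim_od (n : Int) (seznam : List Int) (out : Bool) : Prop := out = je_deljivo_s_katerim_od_alt n seznam
instance (n : Int) (seznam : List Int) (out : Bool) : Decidable (Spec_je_deljivo_s_katerim_od n seznam out) := by unfold Spec_je_deljivo_s_katerim_od; infer_instance

-- ===== CLAIM (what is proved, stated in full; the proofs are below) =====
def Claim_equal_je_deljivo_s_katerim_od : Prop := ∀ (n : Int) (seznam : List Int), Dom_je_deljivo_s_katerim_od n seznam → Pre_je_deljivo_s_katerim_od n seznam → Spec_je_deljivo_s_katerim_od n seznam (je_deljivo_s_katerim_od n seznam)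

-- ===== LEMMAS AND PROOFS =====
theorem je_deljivo_eq_alt (n : Int) (seznam : List Int) :
    je_deljivo_s_katerim_od n seznam = je_deljivo_s_katerim_od_alt n seznam := by
  induction seznam with
  | nil => rfl
  | cons x rest ih =>
    simp only [je_deljivo_s_katerim_od, je_deljivo_s_katerim_od_alt, List.any_cons]
    by_cases h : PySem.Int.mod n x = 0 <;>
      simp [h, ih, je_deljivo_s_katerim_od_alt]

-- ===== VERDICT (by name: the statement is the Claim_ definition above) =====
theorem je_deljivo_s_katerim_od_spec : Claim_equal_je_deljivo_s_katerim_od := by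
  intro n seznam _ _
  unfold Spec_je_deljivo_s_katerim_od
  exact je_deljivo_eq_alt n seznam
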